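-- pv_equiv track=rewrite | github.com/nitheesh2509/Mapup-Assessment | submissions/Python_Section_1.py | rotate_and_transform_matrix
-- ===== SOURCE A (Python) =====
-- from typing import Dict, List, Any
-- from typing import List
--
-- def rotate_and_transform_matrix(matrix: List[List[int]]) -> List[List[int]]:
--     """
--     Rotate the given matrix by 90 degrees clockwise, then replace each element
--     with the sum of all elements in its row and column (in the rotated matrix), excluding itself.
--
--     Args:
--     - matrix (List[List[int]]): 2D list representing the matrix to be transformed.
--
--     Returns:
--     - List[List[int]]: A new 2D list representing the transformed matrix.
--     """
--     if not matrix or not matrix[0]: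
--         return []
--
--     n = len(matrix)
--
--     # Step 1: Rotate the matrix 90 degrees clockwise
--     rotated = [[0] * n for _ in range(n)]
--
--     for i in range(n):
--         for j in range(n):
--             rotated[j][n - 1 - i] = matrix[i][j]
--
--     # Step 2: Calculate the sum of elements in each row and column of the rotated matrix
--     row_sums = [0] * n
--     col_sums = [0] * n
--
--     for i in range(n):
--         for j in range(n):
--             row_sums[i] += rotated[i][j]
--             col_sums[j] += rotated[i][j]
--
--     # Step 3: Create the transformed matrix
--     transformed = [[0] * n for _ in range(n)]  # Initialize the transformed matrix
--
--     for i in range(n):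
--         for j in range(n):
--             # Replace the current element with the row sum + column sum - itself
--             transformed[i][j] = row_sums[i] + col_sums[j] - rotated[i][j]
--
--     return transformed
-- ===== SOURCE B (Python) =====
-- from typing import List
--
-- def rotate_and_transform_matrix(matrix: List[List[int]]) -> List[List[int]]:
--     # Build the result directly from the original matrix's row/column sums,
--     # never constructing the rotated matrix.
--     if not matrix or not matrix[0]:
--         return []
--     n = len(matrix)
--     rows = [sum(row[:n]) for row in matrix]
--     cols = [sum(row[i] for row in matrix) for i in range(n)]
--     return [[cols[i] + rows[n - 1 - j] - matrix[n - 1 - j][i] for j in range(n)]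
--             for i in range(n)]
-- ===== Notes on version B (the rewrite author's own statement) =====
-- stated objective: simpler
-- what changed: B never builds the rotated matrix: it computes the original matrix's row and column sums once and emits each output entry by a closed-form relabelling (rotated row/column sums are original column/row sums), replacing A's three mutation-based double loops plus intermediate grid with two sum passes and one comprehension.
import Mathlib
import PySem

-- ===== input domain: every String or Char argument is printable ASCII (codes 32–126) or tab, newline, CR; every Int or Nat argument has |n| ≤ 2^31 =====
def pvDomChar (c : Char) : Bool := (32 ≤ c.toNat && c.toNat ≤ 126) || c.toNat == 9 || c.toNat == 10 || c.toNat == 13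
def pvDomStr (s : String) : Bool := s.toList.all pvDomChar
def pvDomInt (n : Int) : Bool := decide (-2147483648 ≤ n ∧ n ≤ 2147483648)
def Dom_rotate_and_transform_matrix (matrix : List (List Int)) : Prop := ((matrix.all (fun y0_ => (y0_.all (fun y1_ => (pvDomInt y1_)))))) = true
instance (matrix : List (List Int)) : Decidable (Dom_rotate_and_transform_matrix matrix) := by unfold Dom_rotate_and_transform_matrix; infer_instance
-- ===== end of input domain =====

-- B builds the result directly from the original matrix's row/column sums (a 90° rotation
-- only relabels which row/column a sum comes from), never constructing the rotated matrix.

-- ===== PORT A =====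
def rotate_and_transform_matrix (matrix : List (List Int)) : List (List Int) :=
  match matrix with
  | [] => []
  | r0 :: _ =>
    if r0 = [] then []
    else
      let n := matrix.length
      -- Step 1: rotate 90° clockwise (indices from range n are in range under Pre_)
      let rotated :=
        (List.range n).foldl (fun g i =>
          (List.range n).foldl (fun g j =>
            g.set j ((g.getD j []).set (n - 1 - i) ((matrix.getD i []).getD j 0))) g)
          ((List.range n).map (fun _ => List.replicate n (0 : Int)))
      -- Step 2: row and column sums of the rotated matrix (pair = the two Python lists)
      let sums :=
        (List.range n).foldl (fun p i =>
          (List.range n).foldl (fun p j =>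
            (p.1.set i (p.1.getD i 0 + (rotated.getD i []).getD j 0),
             p.2.set j (p.2.getD j 0 + (rotated.getD i []).getD j 0))) p)
          (List.replicate n (0 : Int), List.replicate n (0 : Int))
      -- Step 3: build the transformed matrix by per-cell assignment
      (List.range n).foldl (fun t i =>
        (List.range n).foldl (fun t j =>
          t.set i ((t.getD i []).set j
            (sums.1.getD i 0 + sums.2.getD j 0 - (rotated.getD i []).getD j 0))) t)
        ((List.range n).map (fun _ => List.replicate n (0 : Int)))

-- ===== PORT B =====
def rotate_and_transform_matrix_alt (matrix : List (List Int)) : List (List Int) :=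
  match matrix with
  | [] => []
  | r0 :: _ =>
    if r0 = [] then []
    else
      let n := matrix.length
      let rows := matrix.map (fun row => (row.take n).sum)
      let cols := (List.range n).map (fun i => (matrix.map (fun row => row.getD i 0)).sum)
      (List.range n).map (fun i => (List.range n).map (fun j =>
        cols.getD i 0 + rows.getD (n - 1 - j) 0 - (matrix.getD (n - 1 - j) []).getD i 0))

-- ===== PRECONDITION & SPEC =====
-- Pre_ excludes exactly the inputs where Python A raises IndexError: a nonempty matrix with a
-- nonempty first row in which some row has fewer than len(matrix) elements (A indexes an n×n block).
def Pre_rotate_and_transform_matrix (matrix : List (List Int)) : Prop :=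
  matrix = [] ∨ matrix.headD [] = [] ∨ ∀ row ∈ matrix, matrix.length ≤ row.length
instance (matrix : List (List Int)) : Decidable (Pre_rotate_and_transform_matrix matrix) := by
  unfold Pre_rotate_and_transform_matrix; infer_instance
def pvWitness_rotate_and_transform_matrix : List (List Int) := [[1, 2], [3, 4]]
def Spec_rotate_and_transform_matrix (matrix : List (List Int)) (out : List (List Int)) : Prop := out = rotate_and_transform_matrix_alt matrix
instance (matrix : List (List Int)) (out : List (List Int)) : Decidable (Spec_rotate_and_transform_matrix matrix out) := by unfold Spec_rotate_and_transform_matrix; infer_instance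

-- ===== CLAIM (what is proved, stated in full; the proofs are below) =====
def Claim_equal_rotate_and_transform_matrix : Prop := ∀ (matrix : List (List Int)), Dom_rotate_and_transform_matrix matrix → Pre_rotate_and_transform_matrix matrix → Spec_rotate_and_transform_matrix matrix (rotate_and_transform_matrix matrix)

-- ===== LEMMAS AND PROOFS =====

-- proof-side readers for the mutable Python lists/grids
def rdv (l : List Int) (i : Nat) : Int := l.getD i 0
def rdg (g : List (List Int)) (i j : Nat) : Int := (g.getD i []).getD j 0
def dims (g : List (List Int)) (n : Nat) : Prop := g.length = n ∧ ∀ r ∈ g, r.length = n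
def S (f : Nat → Int) (m : Nat) : Int := ((List.range m).map f).sum

theorem S_succ (f : Nat → Int) (m : Nat) : S f (m + 1) = S f m + f m := by
  simp [S, List.range_succ]

theorem rdv_set (l : List Int) (i : Nat) (v : Int) (a : Nat) (hi : i < l.length) :
    rdv (l.set i v) a = if a = i then v else rdv l a := by
  simp only [rdv, List.getD_eq_getElem?_getD, List.getElem?_set]
  by_cases h : a = i
  · simp [h, hi]
  · simp [h, Ne.symm h]

theorem rdg_write (g : List (List Int)) (p q : Nat) (v : Int) (a b : Nat)
    (hp : p < g.length) (hq : q < (g.getD p []).length) :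
    rdg (g.set p ((g.getD p []).set q v)) a b = if a = p ∧ b = q then v else rdg g a b := by
  by_cases hap : a = p
  · subst hap
    have h1 : (g.set a ((g.getD a []).set q v)).getD a [] = (g.getD a []).set q v := by
      simp [List.getD_eq_getElem?_getD, hp]
    rw [rdg, h1]
    have := rdv_set (g.getD a []) q v b hq
    simp only [rdv] at this
    rw [this, rdg]
    by_cases hb : b = q <;> simp [hb]
  · have h1 : (g.set p ((g.getD p []).set q v)).getD a [] = g.getD a [] := by
      simp [List.getD_eq_getElem?_getD, Ne.symm hap]
    rw [rdg, h1, rdg]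
    simp [hap]

theorem dims_row_len (g : List (List Int)) (n a : Nat) (hg : dims g n) (ha : a < n) :
    (g.getD a []).length = n := by
  obtain ⟨hlen, hrow⟩ := hg
  have ha' : a < g.length := by omega
  rw [List.getD_eq_getElem?_getD, List.getElem?_eq_getElem ha']
  exact hrow _ (List.getElem_mem ha')

theorem dims_write (g : List (List Int)) (n p q : Nat) (v : Int) (hg : dims g n) (hp : p < n) :
    dims (g.set p ((g.getD p []).set q v)) n := by
  obtain ⟨hlen, hrow⟩ := hg
  refine ⟨by simp [hlen], fun r hr => ?_⟩
  rcases List.mem_or_eq_of_mem_set hr with h | h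
  · exact hrow _ h
  · subst h
    rw [List.length_set]
    exact dims_row_len g n p ⟨hlen, hrow⟩ hp

theorem dims_zero (n : Nat) : dims ((List.range n).map (fun _ => List.replicate n (0 : Int))) n := by
  constructor
  · simp
  · intro r hr
    simp only [List.mem_map] at hr
    obtain ⟨_, _, h⟩ := hr
    simp [← h]

theorem rdg_zero (n a b : Nat) (ha : a < n) :
    rdg ((List.range n).map (fun _ => List.replicate n (0 : Int))) a b = 0 := by
  have h1 : ((List.range n).map (fun _ => List.replicate n (0 : Int))).getD a [] = List.replicate n (0 : Int) := by
    rw [List.getD_eq_getElem?_getD, List.getElem?_map]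
    simp [List.getElem?_range ha]
  rw [rdg, h1]
  simp only [List.getD_eq_getElem?_getD, List.getElem?_replicate]
  split <;> rfl

theorem S_congr (f f' : Nat → Int) (n : Nat) (h : ∀ j, j < n → f j = f' j) : S f n = S f' n := by
  unfold S
  congr 1
  apply List.map_congr_left
  intro j hj
  exact h j (List.mem_range.mp hj)

-- write pattern A (rotation): for each i, write cells (j, n-1-i) for all j
theorem wloopA_inner (w : Nat → Nat → Int) (n i : Nat) (hi : i < n) (g : List (List Int))
    (hg : dims g n) (m : Nat) (hm : m ≤ n) :
    dims ((List.range m).foldl (fun g j => g.set j ((g.getD j []).set (n - 1 - i) (w i j))) g) n ∧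
    ∀ a b, a < n → b < n →
      rdg ((List.range m).foldl (fun g j => g.set j ((g.getD j []).set (n - 1 - i) (w i j))) g) a b
        = if a < m ∧ b = n - 1 - i then w i a else rdg g a b := by
  induction m with
  | zero => simpa using hg
  | succ m ih =>
    obtain ⟨ihd, ihr⟩ := ih (by omega)
    rw [List.range_succ, List.foldl_append, List.foldl_cons, List.foldl_nil]
    set gm := (List.range m).foldl (fun g j => g.set j ((g.getD j []).set (n - 1 - i) (w i j))) g with hgm
    have hmn : m < n := by omega
    have hpl : m < gm.length := by rw [ihd.1]; exact hmn
    have hql : n - 1 - i < (gm.getD m []).length := by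
      rw [dims_row_len gm n m ihd hmn]; omega
    refine ⟨dims_write gm n m (n - 1 - i) (w i m) ihd hmn, fun a b ha hb => ?_⟩
    rw [rdg_write gm m (n - 1 - i) (w i m) a b hpl hql, ihr a b ha hb]
    by_cases hbq : b = n - 1 - i
    · by_cases ham : a = m
      · subst ham; simp [hbq]
      · have h1 : a < m + 1 ↔ a < m := by omega
        simp [ham, hbq, h1]
    · simp [hbq]

theorem wloopA (w : Nat → Nat → Int) (n k : Nat) (hk : k ≤ n) :
    dims ((List.range k).foldl (fun g i =>
        (List.range n).foldl (fun g j => g.set j ((g.getD j []).set (n - 1 - i) (w i j))) g)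
      ((List.range n).map (fun _ => List.replicate n (0 : Int)))) n ∧
    ∀ a b, a < n → b < n →
      rdg ((List.range k).foldl (fun g i =>
          (List.range n).foldl (fun g j => g.set j ((g.getD j []).set (n - 1 - i) (w i j))) g)
        ((List.range n).map (fun _ => List.replicate n (0 : Int)))) a b
        = if n - 1 - b < k then w (n - 1 - b) a else 0 := by
  induction k with
  | zero =>
    refine ⟨dims_zero n, fun a b ha hb => ?_⟩
    rw [List.range_zero, List.foldl_nil, if_neg (by omega)]
    exact rdg_zero n a b ha
  | succ k ih =>
    obtain ⟨ihd, ihr⟩ := ih (by omega)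
    rw [List.range_succ, List.foldl_append, List.foldl_cons, List.foldl_nil]
    have hkn : k < n := by omega
    obtain ⟨hd, hr⟩ := wloopA_inner w n k hkn _ ihd n (le_refl n)
    refine ⟨hd, fun a b ha hb => ?_⟩
    rw [hr a b ha hb, ihr a b ha hb]
    by_cases hbq : b = n - 1 - k
    · have h1 : n - 1 - b = k := by omega
      rw [if_pos (⟨ha, hbq⟩ : a < n ∧ b = n - 1 - k), if_pos (show n - 1 - b < k + 1 by omega), h1]
    · have h1 : n - 1 - b ≠ k := by omega
      have h2 : (n - 1 - b < k + 1) ↔ (n - 1 - b < k) := by omega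
      rw [if_neg (show ¬(a < n ∧ b = n - 1 - k) by tauto)]
      simp only [h2]

-- write pattern B (transform): for each i, write cells (i, j) for all j
theorem wloopB_inner (v : Nat → Nat → Int) (n i : Nat) (hi : i < n) (t : List (List Int))
    (ht : dims t n) (m : Nat) (hm : m ≤ n) :
    dims ((List.range m).foldl (fun t j => t.set i ((t.getD i []).set j (v i j))) t) n ∧
    ∀ a b, a < n → b < n →
      rdg ((List.range m).foldl (fun t j => t.set i ((t.getD i []).set j (v i j))) t) a b
        = if a = i ∧ b < m then v i b else rdg t a b := by
  induction m with
  | zero => simpa using ht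
  | succ m ih =>
    obtain ⟨ihd, ihr⟩ := ih (by omega)
    rw [List.range_succ, List.foldl_append, List.foldl_cons, List.foldl_nil]
    set tm := (List.range m).foldl (fun t j => t.set i ((t.getD i []).set j (v i j))) t with htm
    have hmn : m < n := by omega
    have hpl : i < tm.length := by rw [ihd.1]; exact hi
    have hql : m < (tm.getD i []).length := by rw [dims_row_len tm n i ihd hi]; exact hmn
    refine ⟨dims_write tm n i m (v i m) ihd hi, fun a b ha hb => ?_⟩
    rw [rdg_write tm i m (v i m) a b hpl hql, ihr a b ha hb]
    by_cases hai : a = i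
    · by_cases hbm : b = m
      · subst hbm; simp [hai]
      · have h1 : b < m + 1 ↔ b < m := by omega
        simp [hai, hbm, h1]
    · simp [hai]

theorem wloopB (v : Nat → Nat → Int) (n k : Nat) (hk : k ≤ n) :
    dims ((List.range k).foldl (fun t i =>
        (List.range n).foldl (fun t j => t.set i ((t.getD i []).set j (v i j))) t)
      ((List.range n).map (fun _ => List.replicate n (0 : Int)))) n ∧
    ∀ a b, a < n → b < n →
      rdg ((List.range k).foldl (fun t i =>
          (List.range n).foldl (fun t j => t.set i ((t.getD i []).set j (v i j))) t)
        ((List.range n).map (fun _ => List.replicate n (0 : Int)))) a b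
        = if a < k then v a b else 0 := by
  induction k with
  | zero =>
    refine ⟨dims_zero n, fun a b ha hb => ?_⟩
    rw [List.range_zero, List.foldl_nil, if_neg (by omega)]
    exact rdg_zero n a b ha
  | succ k ih =>
    obtain ⟨ihd, ihr⟩ := ih (by omega)
    rw [List.range_succ, List.foldl_append, List.foldl_cons, List.foldl_nil]
    have hkn : k < n := by omega
    obtain ⟨hd, hr⟩ := wloopB_inner v n k hkn _ ihd n (le_refl n)
    refine ⟨hd, fun a b ha hb => ?_⟩
    rw [hr a b ha hb, ihr a b ha hb]
    by_cases hak : a = k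
    · simp [hak, hb]
    · have h1 : a < k + 1 ↔ a < k := by omega
      simp [hak, h1]

theorem getD_set (l : List Int) (i : Nat) (v : Int) (a : Nat) (hi : i < l.length) :
    (l.set i v).getD a 0 = if a = i then v else l.getD a 0 := by
  have := rdv_set l i v a hi
  simpa [rdv] using this

theorem getD_replicate (n a : Nat) : (List.replicate n (0 : Int)).getD a 0 = 0 := by
  simp only [List.getD_eq_getElem?_getD, List.getElem?_replicate]
  split <;> rfl

theorem sloop_inner (R : List (List Int)) (n i : Nat) (hi : i < n) (p0 : List Int × List Int)
    (h1 : p0.1.length = n) (h2 : p0.2.length = n) (m : Nat) (hm : m ≤ n) :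
    ((List.range m).foldl (fun p j =>
      (p.1.set i (p.1.getD i 0 + (R.getD i []).getD j 0),
       p.2.set j (p.2.getD j 0 + (R.getD i []).getD j 0))) p0).1.length = n ∧
    ((List.range m).foldl (fun p j =>
      (p.1.set i (p.1.getD i 0 + (R.getD i []).getD j 0),
       p.2.set j (p.2.getD j 0 + (R.getD i []).getD j 0))) p0).2.length = n ∧
    (∀ a, a < n → ((List.range m).foldl (fun p j =>
      (p.1.set i (p.1.getD i 0 + (R.getD i []).getD j 0),
       p.2.set j (p.2.getD j 0 + (R.getD i []).getD j 0))) p0).1.getD a 0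
        = p0.1.getD a 0 + (if a = i then S (fun j => (R.getD i []).getD j 0) m else 0)) ∧
    (∀ a, a < n → ((List.range m).foldl (fun p j =>
      (p.1.set i (p.1.getD i 0 + (R.getD i []).getD j 0),
       p.2.set j (p.2.getD j 0 + (R.getD i []).getD j 0))) p0).2.getD a 0
        = p0.2.getD a 0 + (if a < m then (R.getD i []).getD a 0 else 0)) := by
  induction m with
  | zero => simp [h1, h2, S]
  | succ m ih =>
    obtain ⟨ih1, ih2, ihr, ihc⟩ := ih (by omega)
    rw [List.range_succ, List.foldl_append, List.foldl_cons, List.foldl_nil]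
    set pm := (List.range m).foldl (fun p j =>
      (p.1.set i (p.1.getD i 0 + (R.getD i []).getD j 0),
       p.2.set j (p.2.getD j 0 + (R.getD i []).getD j 0))) p0 with hpm
    have hmn : m < n := by omega
    refine ⟨by simp [ih1], by simp [ih2], fun a ha => ?_, fun a ha => ?_⟩
    · show (pm.1.set i (pm.1.getD i 0 + (R.getD i []).getD m 0)).getD a 0 = _
      rw [getD_set pm.1 i _ a (by rw [ih1]; exact hi)]
      by_cases hai : a = i
      · rw [if_pos hai, hai, ihr i hi, if_pos rfl, if_pos rfl, S_succ]
        ring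
      · rw [if_neg hai, ihr a ha, if_neg hai, if_neg hai]
    · show (pm.2.set m (pm.2.getD m 0 + (R.getD i []).getD m 0)).getD a 0 = _
      rw [getD_set pm.2 m _ a (by rw [ih2]; exact hmn)]
      by_cases ham : a = m
      · rw [if_pos ham, ham, ihc m hmn, if_neg (by omega), if_pos (by omega)]
        ring
      · rw [if_neg ham, ihc a ha]
        have h3 : (a < m + 1) ↔ (a < m) := by omega
        simp only [h3]

theorem sloop (R : List (List Int)) (n k : Nat) (hk : k ≤ n) :
    ((List.range k).foldl (fun p i => (List.range n).foldl (fun p j =>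
      (p.1.set i (p.1.getD i 0 + (R.getD i []).getD j 0),
       p.2.set j (p.2.getD j 0 + (R.getD i []).getD j 0))) p)
      (List.replicate n (0 : Int), List.replicate n (0 : Int))).1.length = n ∧
    ((List.range k).foldl (fun p i => (List.range n).foldl (fun p j =>
      (p.1.set i (p.1.getD i 0 + (R.getD i []).getD j 0),
       p.2.set j (p.2.getD j 0 + (R.getD i []).getD j 0))) p)
      (List.replicate n (0 : Int), List.replicate n (0 : Int))).2.length = n ∧
    (∀ a, a < n → ((List.range k).foldl (fun p i => (List.range n).foldl (fun p j =>
      (p.1.set i (p.1.getD i 0 + (R.getD i []).getD j 0),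
       p.2.set j (p.2.getD j 0 + (R.getD i []).getD j 0))) p)
      (List.replicate n (0 : Int), List.replicate n (0 : Int))).1.getD a 0
        = if a < k then S (fun j => (R.getD a []).getD j 0) n else 0) ∧
    (∀ a, a < n → ((List.range k).foldl (fun p i => (List.range n).foldl (fun p j =>
      (p.1.set i (p.1.getD i 0 + (R.getD i []).getD j 0),
       p.2.set j (p.2.getD j 0 + (R.getD i []).getD j 0))) p)
      (List.replicate n (0 : Int), List.replicate n (0 : Int))).2.getD a 0
        = S (fun i => (R.getD i []).getD a 0) k) := by
  induction k with
  | zero =>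
    refine ⟨by simp, by simp, fun a ha => ?_, fun a ha => ?_⟩
    · rw [List.range_zero, List.foldl_nil, if_neg (by omega)]
      exact getD_replicate n a
    · rw [List.range_zero, List.foldl_nil]
      simp [S]
  | succ k ih =>
    obtain ⟨ih1, ih2, ihr, ihc⟩ := ih (by omega)
    rw [List.range_succ, List.foldl_append, List.foldl_cons, List.foldl_nil]
    have hkn : k < n := by omega
    obtain ⟨j1, j2, jr, jc⟩ := sloop_inner R n k hkn _ ih1 ih2 n (le_refl n)
    refine ⟨j1, j2, fun a ha => ?_, fun a ha => ?_⟩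
    · rw [jr a ha, ihr a ha]
      by_cases hak : a = k
      · rw [if_pos hak, if_neg (by omega), if_pos (by omega), hak]
        ring
      · have h3 : (a < k + 1) ↔ (a < k) := by omega
        rw [if_neg hak]
        simp only [h3]
        ring
    · rw [jc a ha, ihc a ha, if_pos ha, S_succ]

theorem getD_getElem (g : List (List Int)) (a : Nat) (ha : a < g.length) :
    g.getD a [] = g[a] := by
  rw [List.getD_eq_getElem?_getD, List.getElem?_eq_getElem ha]
  rfl

theorem getD_int (l : List Int) (b : Nat) (hb : b < l.length) : l.getD b 0 = l[b] := by
  rw [List.getD_eq_getElem?_getD, List.getElem?_eq_getElem hb]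
  rfl

theorem getD_mem (l : List (List Int)) (a : Nat) (ha : a < l.length) : l.getD a [] ∈ l := by
  rw [getD_getElem l a ha]; exact List.getElem_mem ha

theorem grid_ext (g : List (List Int)) (n : Nat) (hg : dims g n) (F : Nat → Nat → Int)
    (h : ∀ a b, a < n → b < n → rdg g a b = F a b) :
    g = (List.range n).map (fun a => (List.range n).map (fun b => F a b)) := by
  apply List.ext_getElem
  · simp [hg.1]
  · intro a h1 h2
    simp only [List.getElem_map, List.getElem_range]
    have ha : a < n := by rw [← hg.1]; exact h1
    apply List.ext_getElem
    · rw [hg.2 _ (List.getElem_mem h1)]; simp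
    · intro b hb1 hb2
      simp only [List.getElem_map, List.getElem_range]
      have hbn : b < n := by rw [hg.2 _ (List.getElem_mem h1)] at hb1; exact hb1
      have hx := h a b ha hbn
      rw [rdg, getD_getElem g a h1, getD_int g[a] b hb1] at hx
      exact hx

theorem map_range_rev (f : Nat → Int) (n : Nat) :
    (List.range n).map (fun j => f (n - 1 - j)) = ((List.range n).map f).reverse := by
  apply List.ext_getElem
  · simp
  · intro t h1 h2
    simp only [List.getElem_map, List.getElem_range, List.getElem_reverse,
      List.length_map, List.length_range]


theorem S_rev (f : Nat → Int) (n : Nat) : S (fun j => f (n - 1 - j)) n = S f n := by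
  unfold S
  rw [map_range_rev, List.sum_reverse]

theorem map_eq_range (l : List (List Int)) (f : List Int → Int) :
    l.map f = (List.range l.length).map (fun k => f (l.getD k [])) := by
  apply List.ext_getElem
  · simp
  · intro k h1 h2
    simp only [List.getElem_map, List.getElem_range]
    rw [getD_getElem l k (by simpa using h1)]

theorem take_sum (l : List Int) (m : Nat) (hm : m ≤ l.length) :
    (l.take m).sum = S (fun i => l.getD i 0) m := by
  induction m with
  | zero => simp [S]
  | succ m ih =>
    have hml : m < l.length := by omega
    rw [S_succ, ← ih (by omega), List.sum_take_succ _ _ hml, getD_int l m hml]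

theorem getD_range_map (f : Nat → Int) (n a : Nat) (ha : a < n) (d : Int) :
    ((List.range n).map f).getD a d = f a := by
  rw [List.getD_eq_getElem?_getD, List.getElem?_map, List.getElem?_range ha]
  rfl

theorem getD_map_rows (l : List (List Int)) (f : List Int → Int) (a : Nat) (ha : a < l.length) :
    (l.map f).getD a 0 = f (l.getD a []) := by
  rw [List.getD_eq_getElem?_getD, List.getElem?_map, List.getElem?_eq_getElem ha]
  rw [getD_getElem l a ha]
  rfl

-- ===== VERDICT (by name: the statement is the Claim_ definition above) =====
theorem rotate_and_transform_matrix_spec : Claim_equal_rotate_and_transform_matrix := by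
  intro matrix hdom hpre
  unfold Spec_rotate_and_transform_matrix
  cases matrix with
  | nil => rfl
  | cons r0 t =>
    by_cases hr : r0 = []
    · simp [rotate_and_transform_matrix, rotate_and_transform_matrix_alt, hr]
    · have hpre' : ∀ row ∈ r0 :: t, (r0 :: t).length ≤ row.length := by
        rcases hpre with h | h | h
        · exact absurd h (by simp)
        · exact absurd h (by simpa using hr)
        · exact h
      simp only [rotate_and_transform_matrix, rotate_and_transform_matrix_alt, if_neg hr]
      set n := (r0 :: t).length with hn
      have hn0 : 0 < n := by rw [hn]; simp
      set ROT := (List.range n).foldl (fun g i =>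
          (List.range n).foldl (fun g j =>
            g.set j ((g.getD j []).set (n - 1 - i) (((r0 :: t).getD i []).getD j 0))) g)
        ((List.range n).map (fun _ => List.replicate n (0 : Int))) with hROT
      set SUMS := (List.range n).foldl (fun p i => (List.range n).foldl (fun p j =>
          (p.1.set i (p.1.getD i 0 + (ROT.getD i []).getD j 0),
           p.2.set j (p.2.getD j 0 + (ROT.getD i []).getD j 0))) p)
        (List.replicate n (0 : Int), List.replicate n (0 : Int)) with hSUMS
      obtain ⟨Rd, Rr⟩ := wloopA (fun i j => ((r0 :: t).getD i []).getD j 0) n n (le_refl n)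
      rw [← hROT] at Rd Rr
      obtain ⟨s1, s2, sr, sc⟩ := sloop ROT n n (le_refl n)
      rw [← hSUMS] at s1 s2 sr sc
      obtain ⟨Td, Tr⟩ := wloopB
        (fun i j => SUMS.1.getD i 0 + SUMS.2.getD j 0 - (ROT.getD i []).getD j 0) n n (le_refl n)
      have hRab : ∀ a b, a < n → b < n →
          (ROT.getD a []).getD b 0 = ((r0 :: t).getD (n - 1 - b) []).getD a 0 := by
        intro a b ha hb
        have h := Rr a b ha hb
        rw [if_pos (by omega)] at h
        simp only [rdg] at h
        exact h
      apply grid_ext _ n Td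
      intro a b ha hb
      rw [Tr a b ha hb, if_pos ha]
      rw [sr a ha, if_pos ha, sc b hb, hRab a b ha hb]
      have e1 : S (fun j => (ROT.getD a []).getD j 0) n
          = S (fun j => ((r0 :: t).getD (n - 1 - j) []).getD a 0) n :=
        S_congr _ _ n (fun j hj => hRab a j ha hj)
      have e2 : S (fun j => ((r0 :: t).getD (n - 1 - j) []).getD a 0) n
          = S (fun k => ((r0 :: t).getD k []).getD a 0) n :=
        S_rev (fun k => ((r0 :: t).getD k []).getD a 0) n
      have e3 : ((List.range n).map (fun i => ((r0 :: t).map (fun row => row.getD i 0)).sum)).getD a 0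
          = ((r0 :: t).map (fun row => row.getD a 0)).sum :=
        getD_range_map _ n a ha 0
      have e4 : ((r0 :: t).map (fun row => row.getD a 0)).sum
          = S (fun k => ((r0 :: t).getD k []).getD a 0) n := by
        rw [map_eq_range, ← hn]
        rfl
      have hb' : n - 1 - b < (r0 :: t).length := by omega
      have hrowlen : n ≤ ((r0 :: t).getD (n - 1 - b) []).length :=
        hn ▸ hpre' _ (getD_mem _ _ hb')
      have f1 : S (fun i => (ROT.getD i []).getD b 0) n
          = S (fun i => ((r0 :: t).getD (n - 1 - b) []).getD i 0) n :=
        S_congr _ _ n (fun i hi => hRab i b hi hb)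
      have f2 : S (fun i => ((r0 :: t).getD (n - 1 - b) []).getD i 0) n
          = (((r0 :: t).getD (n - 1 - b) []).take n).sum :=
        (take_sum _ n hrowlen).symm
      have f3 : ((r0 :: t).map (fun row => (row.take n).sum)).getD (n - 1 - b) 0
          = (((r0 :: t).getD (n - 1 - b) []).take n).sum :=
        getD_map_rows (r0 :: t) (fun row => (row.take n).sum) (n - 1 - b) hb'
      rw [e1, e2, ← e4, ← e3, f1, f2, ← f3]
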